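-- pv_equiv track=rewrite | github.com/RicardoBochnia/EUBW-Researcher | src/eubw_researcher/retrieval/local.py | _reverse_expansion_tokens
-- ===== SOURCE A (Python) =====
-- from typing import Dict, Iterable, List, Optional
--
-- def _reverse_expansion_tokens(
--     tokens: Iterable[str],
--     expansions: Dict[str, List[str]],
-- ) -> List[str]:
--     token_set = set(tokens)
--     return sorted(
--         source_token
--         for source_token, mapped_tokens in expansions.items()
--         if token_set.intersection(mapped_tokens)
--     )
-- ===== SOURCE B (Python) =====
-- def _reverse_expansion_tokens(tokens, expansions):
--     index = {}
--     for source_token, mapped_tokens in expansions.items():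
--         for t in mapped_tokens:
--             index.setdefault(t, set()).add(source_token)
--     matched = set()
--     for t in set(tokens):
--         matched.update(index.get(t, ()))
--     return sorted(matched)
-- ===== Notes on version B (the rewrite author's own statement) =====
-- stated objective: alternative
-- what changed: Replaces the per-entry set-intersection scan over all expansion entries with a prebuilt inverted index (mapped token -> set of source tokens) that is probed once per input token, accumulating matches into a set before sorting.
import Mathlib
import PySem

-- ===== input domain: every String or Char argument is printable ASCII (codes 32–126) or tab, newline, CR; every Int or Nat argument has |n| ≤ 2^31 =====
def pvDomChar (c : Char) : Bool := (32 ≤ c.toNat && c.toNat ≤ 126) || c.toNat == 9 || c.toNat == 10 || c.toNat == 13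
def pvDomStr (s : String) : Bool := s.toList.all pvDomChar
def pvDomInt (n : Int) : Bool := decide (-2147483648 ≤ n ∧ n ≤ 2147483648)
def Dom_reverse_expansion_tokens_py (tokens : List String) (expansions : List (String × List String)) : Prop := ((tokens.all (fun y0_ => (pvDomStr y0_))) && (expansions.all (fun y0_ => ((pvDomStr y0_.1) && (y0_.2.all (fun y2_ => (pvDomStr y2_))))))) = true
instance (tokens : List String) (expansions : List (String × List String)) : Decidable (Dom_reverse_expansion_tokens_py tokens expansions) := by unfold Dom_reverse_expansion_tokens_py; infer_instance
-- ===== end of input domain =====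

-- B replaces A's per-entry intersection scan with an inverted index probed per input token (alternative decomposition, same result).


-- ===== PORT A =====
-- token_set = set(tokens); sorted(src for src, mapped in expansions.items() if token_set.intersection(mapped))
def reverse_expansion_tokens_py (tokens : List String) (expansions : List (String × List String)) : List String :=
  let token_set : PySem.Set String := PySem.Set.ofList tokens
  PySem.List.sorted
    ((expansions.filter (fun p => !(PySem.Set.inter token_set p.2).isEmpty)).map Prod.fst)
    (fun x => x) false

-- ===== PORT B =====
-- index.setdefault(t, set()).add(source_token) == modify t with default empty set, adding source_token
def reverse_expansion_tokens_py_alt (tokens : List String) (expansions : List (String × List String)) : List String :=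
  let index : PySem.Dict String (PySem.Set String) :=
    expansions.foldl
      (fun d p => p.2.foldl (fun d t => d.modify t PySem.Set.empty (fun s => PySem.Set.add s p.1)) d)
      PySem.Dict.empty
  let matched : PySem.Set String :=
    (PySem.Set.ofList tokens).foldl (fun m t => PySem.Set.update m (index.getD t PySem.Set.empty)) PySem.Set.empty
  PySem.List.sorted matched (fun x => x) false

-- ===== PRECONDITION & SPEC =====
-- Pre_ excludes association lists with duplicate source keys: a Python dict cannot contain them, so such
-- lists represent no input of the Python programs (A's port would list a key once per matching entry, B's once).
def Pre_reverse_expansion_tokens_py (tokens : List String) (expansions : List (String × List String)) : Prop :=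
  (expansions.map Prod.fst).Nodup
instance (tokens : List String) (expansions : List (String × List String)) : Decidable (Pre_reverse_expansion_tokens_py tokens expansions) := by unfold Pre_reverse_expansion_tokens_py; infer_instance
def pvWitness_reverse_expansion_tokens_py : List String × (List (String × List String)) :=
  (["a", "c"], [("s", ["a", "b"]), ("t", ["z"])])

def Spec_reverse_expansion_tokens_py (tokens : List String) (expansions : List (String × List String)) (out : List String) : Prop := out = reverse_expansion_tokens_py_alt tokens expansions
instance (tokens : List String) (expansions : List (String × List String)) (out : List String) : Decidable (Spec_reverse_expansion_tokens_py tokens expansions out) := by unfold Spec_reverse_expansion_tokens_py; infer_instance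

-- ===== CLAIM (what is proved, stated in full; the proofs are below) =====
def Claim_equal_reverse_expansion_tokens_py : Prop := ∀ (tokens : List String) (expansions : List (String × List String)), Dom_reverse_expansion_tokens_py tokens expansions → Pre_reverse_expansion_tokens_py tokens expansions → Spec_reverse_expansion_tokens_py tokens expansions (reverse_expansion_tokens_py tokens expansions)

-- ===== LEMMAS AND PROOFS =====

-- inner fold of the index build: membership in one bucket
theorem pv_mem_inner (src : String) (v : List String) (d : PySem.Dict String (PySem.Set String))
    (s t : String) :
    s ∈ (v.foldl (fun d t => d.modify t PySem.Set.empty (fun u => PySem.Set.add u src)) d).getD t PySem.Set.empty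
      ↔ s ∈ d.getD t PySem.Set.empty ∨ (s = src ∧ t ∈ v) := by
  induction v generalizing d with
  | nil => simp
  | cons x xs ih =>
      simp only [List.foldl_cons, ih, PySem.Dict.getD_modify]
      by_cases hx : t = x
      · subst hx; simp [PySem.Set.mem_add]; tauto
      · simp [hx]

-- outer fold of the index build: membership in a bucket
theorem pv_mem_build (l : List (String × List String)) (d : PySem.Dict String (PySem.Set String))
    (s t : String) :
    s ∈ (l.foldl (fun d p => p.2.foldl (fun d t => d.modify t PySem.Set.empty (fun u => PySem.Set.add u p.1)) d) d).getD t PySem.Set.empty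
      ↔ s ∈ d.getD t PySem.Set.empty ∨ ∃ p ∈ l, p.1 = s ∧ t ∈ p.2 := by
  induction l generalizing d with
  | nil => simp
  | cons p ps ih =>
      simp only [List.foldl_cons, ih, pv_mem_inner]
      constructor
      · rintro (⟨h | ⟨rfl, ht⟩⟩ | ⟨q, hq, h1, h2⟩)
        · exact Or.inl h
        · exact Or.inr ⟨p, by simp, rfl, ht⟩
        · exact Or.inr ⟨q, by simp [hq], h1, h2⟩
      · rintro (h | ⟨q, hq, h1, h2⟩)
        · exact Or.inl (Or.inl h)
        · rcases List.mem_cons.mp hq with rfl | hq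
          · exact Or.inl (Or.inr ⟨h1.symm, h2⟩)
          · exact Or.inr ⟨q, hq, h1, h2⟩

-- the update-accumulating fold over tokens: membership and Nodup
theorem pv_mem_union_fold (f : String → PySem.Set String) (l : List String) (m : PySem.Set String)
    (s : String) :
    s ∈ l.foldl (fun m t => PySem.Set.update m (f t)) m ↔ s ∈ m ∨ ∃ t ∈ l, s ∈ f t := by
  induction l generalizing m with
  | nil => simp
  | cons x xs ih =>
      simp only [List.foldl_cons, ih, PySem.Set.mem_update]
      constructor
      · rintro (⟨h | h⟩ | ⟨t, ht, hs⟩)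
        · exact Or.inl h
        · exact Or.inr ⟨x, by simp, h⟩
        · exact Or.inr ⟨t, by simp [ht], hs⟩
      · rintro (h | ⟨t, ht, hs⟩)
        · exact Or.inl (Or.inl h)
        · rcases List.mem_cons.mp ht with rfl | ht
          · exact Or.inl (Or.inr hs)
          · exact Or.inr ⟨t, ht, hs⟩

theorem pv_nodup_union_fold (f : String → PySem.Set String) (l : List String) (m : PySem.Set String)
    (hm : m.Nodup) : (l.foldl (fun m t => PySem.Set.update m (f t)) m).Nodup := by
  induction l generalizing m with
  | nil => exact hm
  | cons x xs ih => exact ih _ (PySem.Set.nodup_update _ _ hm)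

-- ===== VERDICT (by name: the statement is the Claim_ definition above) =====
theorem reverse_expansion_tokens_py_spec : Claim_equal_reverse_expansion_tokens_py := by
  intro tokens expansions _ hpre
  unfold Spec_reverse_expansion_tokens_py reverse_expansion_tokens_py reverse_expansion_tokens_py_alt
  apply PySem.List.sorted_eq_sorted_of_perm _ _ _ (fun a b h => h)
  apply (List.perm_ext_iff_of_nodup ?_ ?_).mpr
  · intro s
    simp only [List.mem_map, List.mem_filter]
    constructor
    · rintro ⟨p, ⟨hp, hcond⟩, rfl⟩
      -- the filter condition: the intersection with token_set is nonempty
      have hne : PySem.Set.inter (PySem.Set.ofList tokens) p.2 ≠ [] := by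
        simpa [List.isEmpty_iff] using hcond
      rcases List.exists_mem_of_ne_nil _ hne with ⟨t, ht⟩
      rw [PySem.Set.mem_inter] at ht
      rw [pv_mem_union_fold]
      refine Or.inr ⟨t, ht.1, ?_⟩
      rw [pv_mem_build]
      exact Or.inr ⟨p, hp, rfl, ht.2⟩
    · intro hs
      rw [pv_mem_union_fold] at hs
      rcases hs with h | ⟨t, ht, hs⟩
      · simp at h
      · rw [pv_mem_build] at hs
        rcases hs with h | ⟨p, hp, rfl, htp⟩
        · simp at h
        · refine ⟨p, ⟨hp, ?_⟩, rfl⟩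
          simp only [Bool.not_eq_true']
          rw [Bool.eq_false_iff]
          intro habs
          have hmem : t ∈ PySem.Set.inter (PySem.Set.ofList tokens) p.2 := by
            rw [PySem.Set.mem_inter]
            exact ⟨ht, htp⟩
          rw [List.isEmpty_iff.mp habs] at hmem
          simp at hmem
  · -- keys of the filtered list are Nodup (sublist of the Nodup key list)
    exact hpre.sublist (List.Sublist.map Prod.fst List.filter_sublist)
  · exact pv_nodup_union_fold _ _ _ (by simp [PySem.Set.empty])
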